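-- pv_equiv track=rewrite | github.com/qiskit-community/qiskit-qec | qiskit_qec/arithmetic/modn.py | _stab
-- ===== SOURCE A (Python) =====
-- import math
--
-- def _stab(a: int, b: int, n: int) -> int:
--     """Returns a ring element c such that gcd(a + b * c, n) = gcd(a, b, n) in
--     the ring Z/nZ.
--
--     Args:
--         a: input integer
--         b: input integer
--         n: modulus
--
--     Returns:
--         ring element c such that gcd(a+b*c, N) = gcd(a, b, N)
--
--     Examples:
--         >>> _stab(25, 8, 6)
--         0
--
--         >>> _stab(24, 8, 6)
--         1
--
--     See Also:
--     stab
--     """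
--     a, b = a % n, b % n
--     gcd = math.gcd(math.gcd(a, b), n)
--     n_old = n
--     a, n = a // gcd, n // gcd
--     if n == 0:
--         c = 0
--     else:
--         a = a % n
--         if a == 0:
--             c = 1
--         else:
--             r = int(math.ceil(math.log2(math.log2(n)))) if n > 1 else 1
--             for _ in range(r):
--                 a = a * a % n
--             c = n // math.gcd(a, n)
--     return c % n_old
-- ===== SOURCE B (Python) =====
-- import math
--
-- def _stab(a: int, b: int, n: int) -> int:
--     """Returns a ring element c such that gcd(a + b * c, n) = gcd(a, b, n)
--     in the ring Z/nZ (n > 0), by stripping from n every prime factor it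
--     shares with a instead of the repeated-squaring pass of the original."""
--     a, b = a % n, b % n
--     g = math.gcd(math.gcd(a, b), n)
--     n_old = n
--     a, n = a // g, n // g
--     a %= n
--     m = n
--     d = math.gcd(a, m)
--     while d > 1:
--         m //= d
--         d = math.gcd(a, m)
--     return m % n_old
-- ===== Notes on version B (the rewrite author's own statement) =====
-- stated objective: simpler
-- what changed: Replaces the float-log exponent bound and the repeated-squaring loop computing a^(2^r) mod n followed by c = n//gcd(a,n) with a direct gcd-stripping loop (repeatedly divide m by gcd(a,m) until it is 1) that computes the largest divisor of n coprime to a; the a==0 and n==1 special cases disappear.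
-- outside the precondition, e.g. on _stab(-6, -1, -8): A returns -2, B returns -1; on _stab(1, 2, 0): A raises ZeroDivisionError, B raises ZeroDivisionError
import Mathlib
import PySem

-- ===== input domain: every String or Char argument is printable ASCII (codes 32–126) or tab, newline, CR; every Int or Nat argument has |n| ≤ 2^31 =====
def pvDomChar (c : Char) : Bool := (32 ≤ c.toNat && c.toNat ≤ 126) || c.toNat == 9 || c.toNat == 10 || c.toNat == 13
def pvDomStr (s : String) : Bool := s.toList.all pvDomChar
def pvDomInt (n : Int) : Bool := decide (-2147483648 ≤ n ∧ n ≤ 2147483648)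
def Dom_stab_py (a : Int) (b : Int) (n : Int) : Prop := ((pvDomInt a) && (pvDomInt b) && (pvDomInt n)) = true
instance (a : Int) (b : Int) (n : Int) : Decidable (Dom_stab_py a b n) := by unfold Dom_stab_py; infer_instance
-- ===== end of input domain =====

-- B replaces A's float-log bound and repeated-squaring pass by a gcd-stripping loop (objective: simpler).

-- ===== PORT A =====
-- hand port of `int(math.ceil(math.log2(math.log2(n))))` for n > 1: exact for 1 < n ≤ 2^31
-- (checked numerically on that whole range against CPython; float log2 itself is not in PySem).
def pyCeilLog2Log2 (n : Int) : Nat :=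
  if n ≤ 2 then 0 else if n ≤ 4 then 1 else if n ≤ 16 then 2
  else if n ≤ 256 then 3 else if n ≤ 65536 then 4 else 5

-- `for _ in range(r): a = a * a % n`
def sqLoop (n : Int) (a : Int) : Nat → Int
  | 0 => a
  | k + 1 => sqLoop n (PySem.Int.mod (a * a) n) k

def stab_py (a : Int) (b : Int) (n : Int) : Int :=
  let a1 := PySem.Int.mod a n
  let b1 := PySem.Int.mod b n
  let g : Int := Int.gcd (Int.gcd a1 b1) n
  let nOld := n
  let a2 := PySem.Int.floordiv a1 g
  let n2 := PySem.Int.floordiv n g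
  let c : Int :=
    if n2 = 0 then 0
    else
      let a3 := PySem.Int.mod a2 n2
      if a3 = 0 then 1
      else
        let r : Nat := if n2 > 1 then pyCeilLog2Log2 n2 else 1
        let a4 := sqLoop n2 a3 r
        PySem.Int.floordiv n2 (Int.gcd a4 n2)
  PySem.Int.mod c nOld

-- ===== PORT B =====
-- termination helper for the while-loop below (cited in its decreasing_by)
theorem stripLoop_dec (d m : Int) (hd : 1 < d) (hdvd : d ∣ m) (hm : m ≠ 0) :
    (PySem.Int.floordiv m d).natAbs < m.natAbs := by
  obtain ⟨k, hk⟩ := hdvd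
  have hg0 : (0:Int) < d := by omega
  have heq : PySem.Int.floordiv m d = k := by
    rw [PySem.Int.floordiv_eq_ediv_of_pos hg0, hk, Int.mul_ediv_cancel_left _ (by omega)]
  rw [heq]
  have hk0 : k ≠ 0 := by rintro rfl; simp at hk; omega
  calc k.natAbs < 2 * k.natAbs := by omega
    _ ≤ d.natAbs * k.natAbs := by apply Nat.mul_le_mul_right; omega
    _ = m.natAbs := by rw [hk, Int.natAbs_mul]

-- `d = gcd(a, m); while d > 1: m //= d; d = gcd(a, m)`  (the `m ≠ 0` conjunct only
-- makes the recursion total; inside Pre_ the loop always has m ≥ 1)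
def stripLoop (a : Int) (m : Int) : Int :=
  let d : Int := Int.gcd a m
  if h : 1 < d ∧ m ≠ 0 then stripLoop a (PySem.Int.floordiv m d) else m
termination_by m.natAbs
decreasing_by exact stripLoop_dec _ m h.1 (Int.gcd_dvd_right a m) h.2

def stab_py_alt (a : Int) (b : Int) (n : Int) : Int :=
  let a1 := PySem.Int.mod a n
  let b1 := PySem.Int.mod b n
  let g : Int := Int.gcd (Int.gcd a1 b1) n
  let nOld := n
  let a2 := PySem.Int.floordiv a1 g
  let n2 := PySem.Int.floordiv n g
  let a3 := PySem.Int.mod a2 n2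
  let c := stripLoop a3 n2
  PySem.Int.mod c nOld

-- ===== PRECONDITION & SPEC =====
-- Pre_ restricts to the natural domain of a modulus, n > 0: at n = 0 A raises
-- ZeroDivisionError, and for n < 0 A's single squaring pass returns accidental values
-- that break its own documented guarantee gcd(a+b*c, n) = gcd(a, b, n).
def Pre_stab_py (a : Int) (b : Int) (n : Int) : Prop := 0 < n
instance (a : Int) (b : Int) (n : Int) : Decidable (Pre_stab_py a b n) := by unfold Pre_stab_py; infer_instance
def pvWitness_stab_py : Int × Int × Int := (25, 8, 6)

def Spec_stab_py (a : Int) (b : Int) (n : Int) (out : Int) : Prop := out = stab_py_alt a b n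
instance (a : Int) (b : Int) (n : Int) (out : Int) : Decidable (Spec_stab_py a b n out) := by unfold Spec_stab_py; infer_instance

-- ===== CLAIM =====
def Claim_equal_stab_py : Prop := ∀ (a : Int) (b : Int) (n : Int), Dom_stab_py a b n → Pre_stab_py a b n → Spec_stab_py a b n (stab_py a b n)

-- ===== LEMMAS AND PROOFS =====

-- Nat-level mirror of stripLoop
def stripNat (a : Nat) (m : Nat) : Nat :=
  let d := Nat.gcd a m
  if h : 1 < d ∧ m ≠ 0 then stripNat a (m / d) else m
termination_by m
decreasing_by exact Nat.div_lt_self (by omega) h.1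

-- the largest divisor of n coprime to a
def IsCopart (a n x : Nat) : Prop :=
  x ∣ n ∧ Nat.Coprime x a ∧ ∀ d, d ∣ n → Nat.Coprime d a → d ∣ x

theorem isCopart_unique {a n x y : Nat} (hx : IsCopart a n x) (hy : IsCopart a n y) : x = y :=
  Nat.dvd_antisymm (hy.2.2 x hx.1 hx.2.1) (hx.2.2 y hy.1 hy.2.1)

theorem stripLoop_eq_stripNat :
    ∀ (k : Nat) (m : Int), m.toNat ≤ k → 0 < m → ∀ (a : Int), 0 ≤ a →
      stripLoop a m = (stripNat a.toNat m.toNat : Int) := by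
  intro k
  induction k with
  | zero => intro m hk hm; omega
  | succ k ih =>
    intro m hk hm a ha
    rw [stripLoop, stripNat]
    have hgcd : (Int.gcd a m : Int) = (Nat.gcd a.toNat m.toNat : Int) := by
      rw [← Int.gcd_natCast_natCast, Int.toNat_of_nonneg ha, Int.toNat_of_nonneg (le_of_lt hm)]
    by_cases h : 1 < Nat.gcd a.toNat m.toNat
    · have hci : (1 < (Int.gcd a m : Int) ∧ m ≠ 0) := by constructor <;> [omega; omega]
      rw [dif_pos hci, dif_pos ⟨h, by omega⟩]
      have hdvd : (Int.gcd a m : Int) ∣ m := Int.gcd_dvd_right a m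
      have hfd : PySem.Int.floordiv m (Int.gcd a m) = ((m.toNat / Nat.gcd a.toNat m.toNat : Nat) : Int) := by
        rw [PySem.Int.floordiv_eq_ediv_of_pos (by omega), hgcd]
        conv_lhs => rw [← Int.toNat_of_nonneg (le_of_lt hm)]
        exact (Int.natCast_ediv m.toNat _).symm
      have hdvdN : Nat.gcd a.toNat m.toNat ∣ m.toNat := Nat.gcd_dvd_right _ _
      have hpos : 0 < m.toNat / Nat.gcd a.toNat m.toNat := Nat.div_pos (Nat.le_of_dvd (by omega) hdvdN) (by omega)
      have hlt : m.toNat / Nat.gcd a.toNat m.toNat < m.toNat := Nat.div_lt_self (by omega) h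
      rw [hfd]
      have := ih ((m.toNat / Nat.gcd a.toNat m.toNat : Nat) : Int) (by omega) (by exact_mod_cast hpos) a ha
      rw [this, Int.toNat_natCast]
    · rw [dif_neg (by omega), dif_neg (by omega), Int.toNat_of_nonneg (le_of_lt hm)]

theorem stripNat_isCopart (a m : Nat) (hm : m ≠ 0) : IsCopart a m (stripNat a m) := by
  induction m using Nat.strong_induction_on with
  | _ m ih =>
    rw [stripNat]
    by_cases h : 1 < Nat.gcd a m
    · rw [dif_pos ⟨h, hm⟩]
      have hdvd : Nat.gcd a m ∣ m := Nat.gcd_dvd_right _ _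
      have hq : m / Nat.gcd a m ≠ 0 := by
        have := Nat.div_pos (Nat.le_of_dvd (by omega) hdvd) (by omega); omega
      have hlt : m / Nat.gcd a m < m := Nat.div_lt_self (by omega) h
      obtain ⟨hx1, hx2, hx3⟩ := ih _ hlt hq
      refine ⟨hx1.trans (Nat.div_dvd_of_dvd hdvd), hx2, ?_⟩
      intro e he hce
      have hcd : Nat.Coprime e (Nat.gcd a m) := hce.coprime_dvd_right (Nat.gcd_dvd_left a m)
      have hme : e ∣ (m / Nat.gcd a m) * Nat.gcd a m := by
        rw [Nat.div_mul_cancel hdvd]; exact he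
      exact hx3 e (hcd.dvd_of_dvd_mul_right hme) hce
    · rw [dif_neg (by omega)]
      have hg : Nat.gcd a m = 1 := by
        rcases Nat.eq_zero_or_pos (Nat.gcd a m) with h0 | h1
        · exact absurd (Nat.gcd_eq_zero_iff.mp h0).2 hm
        · omega
      exact ⟨dvd_refl m, (Nat.coprime_comm.mp hg), fun d hd _ => hd⟩

theorem factorization_le_of_le_pow {N K : Nat} (hN : N ≠ 0) (hle : N ≤ 2 ^ K) :
    ∀ p, N.factorization p ≤ K := by
  intro p
  by_cases hv : N.factorization p = 0
  · omega
  · have hp : p.Prime := Nat.prime_of_mem_primeFactors (by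
      rw [← Nat.support_factorization]; exact Finsupp.mem_support_iff.mpr hv)
    have h1 : p ^ N.factorization p ∣ N := Nat.ordProj_dvd N p
    have h2 : p ^ N.factorization p ≤ N := Nat.le_of_dvd (by omega) h1
    have h3 : 2 ^ N.factorization p ≤ p ^ N.factorization p :=
      Nat.pow_le_pow_left hp.two_le _
    have h4 : 2 ^ N.factorization p ≤ 2 ^ K := by omega
    exact (Nat.pow_le_pow_iff_right (by omega)).mp h4

theorem copart_of_pow (a N K : Nat) (ha : a ≠ 0) (hN : N ≠ 0)
    (hK : ∀ p, N.factorization p ≤ K) :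
    IsCopart a N (N / Nat.gcd (a ^ K) N) := by
  have haK : a ^ K ≠ 0 := pow_ne_zero _ ha
  have hGd : Nat.gcd (a ^ K) N ∣ N := Nat.gcd_dvd_right _ _
  have hG0 : Nat.gcd (a ^ K) N ≠ 0 := fun h0 => hN ((Nat.gcd_eq_zero_iff.mp h0).2)
  have hx0 : N / Nat.gcd (a ^ K) N ≠ 0 := by
    have := Nat.div_pos (Nat.le_of_dvd (by omega) hGd) (by omega); omega
  have hGfact : ∀ p, (Nat.gcd (a ^ K) N).factorization p
      = min (K * a.factorization p) (N.factorization p) := by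
    intro p
    rw [Nat.factorization_gcd haK hN, Finsupp.inf_apply, Nat.factorization_pow]
    simp
  have hxfact : ∀ p, (N / Nat.gcd (a ^ K) N).factorization p
      = N.factorization p - (Nat.gcd (a ^ K) N).factorization p := by
    intro p
    rw [Nat.factorization_div hGd]
    simp [Finsupp.tsub_apply]
  refine ⟨Nat.div_dvd_of_dvd hGd, ?_, ?_⟩
  · -- coprime to a
    by_contra hne
    obtain ⟨p, hp, hpd⟩ := Nat.exists_prime_and_dvd hne
    have hpx : p ∣ N / Nat.gcd (a ^ K) N := hpd.trans (Nat.gcd_dvd_left _ _)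
    have hpa : p ∣ a := hpd.trans (Nat.gcd_dvd_right _ _)
    have hvx : 0 < (N / Nat.gcd (a ^ K) N).factorization p :=
      hp.factorization_pos_of_dvd hx0 hpx
    have hva : 0 < a.factorization p := hp.factorization_pos_of_dvd ha hpa
    have h1 := hGfact p
    have h2 := hxfact p
    have h3 := hK p
    have hKle : K * 1 ≤ K * a.factorization p := Nat.mul_le_mul_left _ hva
    have hmin : min (K * a.factorization p) (N.factorization p) = N.factorization p :=
      Nat.min_eq_right (by omega)
    rw [h1, hmin] at h2
    omega
  · intro e he hce
    have he0 : e ≠ 0 := fun h0 => hN (by simpa [h0] using he)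
    rw [← Nat.factorization_le_iff_dvd he0 hx0]
    intro p
    by_cases hv : e.factorization p = 0
    · simp [hv]
    · have hp : p.Prime := Nat.prime_of_mem_primeFactors (by
        rw [← Nat.support_factorization]; exact Finsupp.mem_support_iff.mpr hv)
      have hpe : p ∣ e := Nat.dvd_of_factorization_pos hv
      have hpa : ¬ p ∣ a := by
        intro hpa
        have hpg : p ∣ Nat.gcd e a := Nat.dvd_gcd hpe hpa
        have : p ∣ 1 := hce ▸ hpg
        have h1 := Nat.eq_one_of_dvd_one this
        have h2 := hp.two_le
        omega
      have hva : a.factorization p = 0 := Nat.factorization_eq_zero_of_not_dvd hpa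
      have heN : e.factorization p ≤ N.factorization p :=
        (Nat.factorization_le_iff_dvd he0 hN).mpr he p
      have h1 : (Nat.gcd (a ^ K) N).factorization p = 0 := by
        rw [hGfact p, hva]; simp
      have h2 := hxfact p
      rw [h1] at h2
      omega

theorem sqLoop_eq (N : Int) (hN : 0 < N) : ∀ (r : Nat) (a : Int), 0 ≤ a → a < N →
    sqLoop N a r = ((a.toNat ^ (2 ^ r) % N.toNat : Nat) : Int) := by
  intro r
  induction r with
  | zero =>
    intro a h0 hlt
    have : a.toNat % N.toNat = a.toNat := Nat.mod_eq_of_lt (by omega)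
    simp [sqLoop, this, Int.toNat_of_nonneg h0]
  | succ k ih =>
    intro a h0 hlt
    have hmn : 0 ≤ PySem.Int.mod (a * a) N := PySem.Int.mod_nonneg _ hN
    have hml : PySem.Int.mod (a * a) N < N := PySem.Int.mod_lt _ hN
    have hcast : (PySem.Int.mod (a * a) N).toNat = a.toNat * a.toNat % N.toNat := by
      rw [PySem.Int.mod_eq_emod_of_pos hN]
      have : a * a = ((a.toNat * a.toNat : Nat) : Int) := by
        push_cast [Int.toNat_of_nonneg h0]; ring
      rw [this]
      conv_lhs => rw [show N = ((N.toNat : Nat) : Int) from (Int.toNat_of_nonneg (le_of_lt hN)).symm]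
      rw [← Int.natCast_emod, Int.toNat_natCast]
    have := ih (PySem.Int.mod (a * a) N) hmn hml
    rw [sqLoop, this, hcast]
    congr 1
    rw [Nat.pow_mod, Nat.mod_mod_of_dvd _ (dvd_refl _)]
    rw [← Nat.pow_mod]
    have : (a.toNat * a.toNat) ^ 2 ^ k = a.toNat ^ 2 ^ (k + 1) := by
      rw [← pow_two, ← pow_mul, pow_succ, Nat.mul_comm]
    rw [this]

theorem pyCeil_bound (n : Int) (h : n ≤ 4294967296) : n ≤ (2:Int) ^ (2 ^ pyCeilLog2Log2 n) := by
  unfold pyCeilLog2Log2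
  split_ifs <;> norm_num <;> omega

theorem core_branch (a3 n2 : Int) (h0 : 0 ≤ a3) (hlt : a3 < n2) (hpos : 0 < n2)
    (hbig : n2 ≤ 2147483648) :
    (if a3 = 0 then (1:Int)
     else PySem.Int.floordiv n2
       (Int.gcd (sqLoop n2 a3 (if n2 > 1 then pyCeilLog2Log2 n2 else 1)) n2))
    = stripLoop a3 n2 := by
  have hNne : n2.toNat ≠ 0 := by omega
  have hB : stripLoop a3 n2 = (stripNat a3.toNat n2.toNat : Int) :=
    stripLoop_eq_stripNat n2.toNat n2 (by omega) hpos a3 h0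
  by_cases hz : a3 = 0
  · rw [if_pos hz, hB, hz]
    have h2 : IsCopart 0 n2.toNat 1 :=
      ⟨one_dvd _, Nat.coprime_one_left _, fun d _ hc => by
        have hd1 : d = 1 := (Nat.coprime_zero_right d).mp hc
        simp [hd1]⟩
    have heq : stripNat 0 n2.toNat = 1 :=
      isCopart_unique (stripNat_isCopart 0 n2.toNat hNne) h2
    show (1:Int) = ((stripNat (0:Int).toNat n2.toNat : Nat) : Int)
    rw [Int.toNat_zero, heq]
    norm_num
  · rw [if_neg hz]
    have h1lt : n2 > 1 := by omega
    rw [if_pos h1lt]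
    rw [sqLoop_eq n2 hpos (pyCeilLog2Log2 n2) a3 h0 hlt, hB]
    set K : Nat := 2 ^ pyCeilLog2Log2 n2 with hK
    set N : Nat := n2.toNat with hN
    set x : Nat := a3.toNat ^ K with hx
    have hcastN : ((N : Nat) : Int) = n2 := by rw [hN]; exact Int.toNat_of_nonneg (by omega)
    rw [← hcastN, Int.gcd_natCast_natCast, PySem.Int.floordiv_natCast]
    have hgr : Nat.gcd (x % N) N = Nat.gcd x N := by
      rw [← Nat.gcd_rec]
      exact Nat.gcd_comm N x
    rw [hgr]
    congr 1
    have ha3ne : a3.toNat ≠ 0 := by omega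
    have hNle : N ≤ 2 ^ K := by
      have hb1 := pyCeil_bound n2 (by omega)
      have hb2 : ((2:Int)) ^ 2 ^ pyCeilLog2Log2 n2 = ((2 ^ 2 ^ pyCeilLog2Log2 n2 : Nat) : Int) := by
        push_cast; ring
      rw [hb2] at hb1
      rw [hK, hN]
      omega
    rw [hx]
    exact isCopart_unique
      (copart_of_pow a3.toNat N K ha3ne (by rw [hN]; exact hNne)
        (factorization_le_of_le_pow (by rw [hN]; exact hNne) hNle))
      (stripNat_isCopart a3.toNat N (by rw [hN]; exact hNne))

-- ===== VERDICT =====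
theorem stab_py_spec : Claim_equal_stab_py := by
  intro a b n hdom hpre
  have hn : 0 < n := hpre
  have hn31 : n ≤ 2147483648 := by
    unfold Dom_stab_py pvDomInt at hdom
    simp only [Bool.and_eq_true, decide_eq_true_eq] at hdom
    exact hdom.2.2
  simp only [Spec_stab_py, stab_py, stab_py_alt]
  set gn : Nat := Int.gcd (Int.gcd (PySem.Int.mod a n) (PySem.Int.mod b n)) n with hgn
  have hgdvd : (gn:Int) ∣ n := Int.gcd_dvd_right _ _
  have hgpos : 0 < (gn:Int) := by
    rcases Nat.eq_zero_or_pos gn with h0 | h1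
    · exfalso
      rw [hgn] at h0
      have := Int.gcd_eq_zero_iff.mp h0
      omega
    · exact_mod_cast h1
  set n2 := PySem.Int.floordiv n (gn:Int) with hn2
  obtain ⟨k, hk⟩ := hgdvd
  have hn2k : n2 = k := by
    rw [hn2, PySem.Int.floordiv_eq_ediv_of_pos hgpos, hk,
      Int.mul_ediv_cancel_left _ (by omega)]
  have hn2pos : 0 < n2 := by
    rw [hn2k]
    by_contra hle
    have hle2 : k ≤ 0 := by omega
    nlinarith [hk, hgpos, hn]
  have hn2len : n2 ≤ n := by
    rw [hn2k]
    nlinarith [hk, hgpos, hn2pos, hn2k]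
  rw [if_neg (by omega : ¬ n2 = 0)]
  exact congrArg (fun c => PySem.Int.mod c n)
    (core_branch (PySem.Int.mod (PySem.Int.floordiv (PySem.Int.mod a n) (gn:Int)) n2) n2
      (PySem.Int.mod_nonneg _ hn2pos) (PySem.Int.mod_lt _ hn2pos) hn2pos (by omega))
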